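-- pv_equiv track=rewrite | github.com/causify-ai/helpers | helpers/hmarkdown_div_blocks.py | add_prettier_ignore_to_div_blocks
-- ===== SOURCE A (Python) =====
-- from typing import List, Tuple
--
-- def _split_lines_into_chunks(
--     lines: List[str],
-- ) -> List[Tuple[bool, List[str]]]:
--     """
--     Split lines into chunks of div blocks and non-div blocks.
--
--     A div block starts with a line containing ::: and ends with another
--     line containing :::.
--
--     :param lines: List of strings representing lines in a markdown file.
--     :return: List of tuples (is_div_block, chunk_lines) where is_div_block
--         indicates if the chunk is a div block.
--     """
--     chunks = []
--     i = 0
--     while i < len(lines):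
--         line = lines[i]
--         # Check if this line starts a div block.
--         if line.strip().startswith(":::"):
--             # Look ahead to find the closing div block.
--             j = i + 1
--             while j < len(lines):
--                 if lines[j].strip().startswith(":::"):
--                     # Found the end of the div block.
--                     chunk_lines = lines[i : j + 1]
--                     chunks.append((True, chunk_lines))
--                     i = j + 1
--                     break
--                 j += 1
--             else:
--                 # No closing div block found, treat as regular line.
--                 chunks.append((False, [line]))
--                 i += 1
--         else:
--             # Start a non-div block chunk.
--             chunk_lines = [line]
--             i += 1
--             # Continue collecting non-div lines.
--             while i < len(lines) and not lines[i].strip().startswith(":::"):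
--                 chunk_lines.append(lines[i])
--                 i += 1
--             chunks.append((False, chunk_lines))
--     return chunks
--
-- def add_prettier_ignore_to_div_blocks(lines: List[str]) -> List[str]:
--     """
--     Add prettier-ignore comments around div blocks.
--
--     A div block starts with a line containing ::: and has another line
--     with ::: following it.
--
--     Examples of div blocks:
--     - ::::
--       ::::{.column width=40%}
--     - :::columns
--       ::::{.column width=60%}
--     - ::::
--       :::
--
--     :param lines: List of strings representing lines in a markdown file.
--     :return: List of strings with prettier-ignore comments added.
--     """
--     # Step 1: Split into chunks.
--     chunks = _split_lines_into_chunks(lines)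
--     # Step 2: Process chunks and add prettier-ignore comments.
--     result = []
--     for is_div_block, chunk_lines in chunks:
--         if is_div_block:
--             # Add prettier-ignore comments around div blocks.
--             result.append("")
--             result.append("<!-- prettier-ignore-start -->")
--             result.extend(chunk_lines)
--             result.append("<!-- prettier-ignore-end -->")
--             result.append("")
--         else:
--             # Add non-div block lines as-is.
--             result.extend(chunk_lines)
--     return result
-- ===== SOURCE B (Python) =====
-- def add_prettier_ignore_to_div_blocks(lines):
--     # Precompute the indices of all ':::' marker lines, then greedily pair
--     # consecutive markers; each pair delimits one div block. Everything between
--     # blocks (and any unpaired trailing marker) is copied through via slices.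
--     marks = [i for i, line in enumerate(lines) if line.strip().startswith(":::")]
--     result = []
--     prev = 0
--     while len(marks) >= 2:
--         a, b = marks[0], marks[1]
--         marks = marks[2:]
--         result += lines[prev:a]
--         result += ["", "<!-- prettier-ignore-start -->"]
--         result += lines[a:b + 1]
--         result += ["<!-- prettier-ignore-end -->", ""]
--         prev = b + 1
--     result += lines[prev:]
--     return result
-- ===== Notes on version B (the rewrite author's own statement) =====
-- stated objective: alternative
-- what changed: B replaces A's nested look-ahead scan with chunk staging by a marker-index algorithm: it first collects the indices of all ':::' lines, greedily pairs consecutive markers, and then assembles the output from slices between/inside the pairs.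
import Mathlib
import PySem

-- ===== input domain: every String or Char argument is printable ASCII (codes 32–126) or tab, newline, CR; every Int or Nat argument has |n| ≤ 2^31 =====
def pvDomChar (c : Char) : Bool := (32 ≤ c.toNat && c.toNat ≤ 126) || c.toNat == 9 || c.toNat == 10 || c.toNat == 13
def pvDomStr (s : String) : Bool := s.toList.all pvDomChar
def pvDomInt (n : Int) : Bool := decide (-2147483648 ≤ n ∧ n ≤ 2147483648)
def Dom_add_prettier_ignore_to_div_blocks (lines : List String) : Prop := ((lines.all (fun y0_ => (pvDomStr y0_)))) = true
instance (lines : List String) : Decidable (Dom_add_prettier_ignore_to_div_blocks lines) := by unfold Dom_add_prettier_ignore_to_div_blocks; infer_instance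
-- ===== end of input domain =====

-- B replaces A's nested look-ahead scan with chunk staging by a marker-index algorithm:
-- it precomputes the indices of all ':::' lines, greedily pairs consecutive markers, and
-- assembles the output from slices between/inside the pairs (objective: alternative).
-- In port A, loops over an index carry a Nat fuel argument guarding totality only:
-- fuel = remaining line count, one unit per iteration, exactly enough by construction.

-- ===== PORT A =====
-- line.strip().startswith(":::")
def pvIsDiv (line : String) : Bool := PySem.Str.startswith (PySem.Str.strip line) ":::"

-- A's inner `while j < len(lines): if div: break; j += 1 / else:` look-ahead
def pvFindClose (lines : List String) : Nat → Nat → Option Nat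
  | 0, _ => none
  | fuel + 1, j =>
    if j < lines.length then
      if pvIsDiv (lines.getD j "") then some j else pvFindClose lines fuel (j + 1)
    else none

-- A's inner non-div collecting loop (chunk_lines, i as state)
def pvCollect (lines : List String) : Nat → Nat → List String → List String × Nat
  | 0, i, acc => (acc, i)
  | fuel + 1, i, acc =>
    if i < lines.length then
      if pvIsDiv (lines.getD i "") then (acc, i)
      else pvCollect lines fuel (i + 1) (acc ++ [lines.getD i ""])
    else (acc, i)

-- A's _split_lines_into_chunks (outer while loop)
def pvSplitChunks (lines : List String) : Nat → Nat → List (Bool × List String)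
  | 0, _ => []
  | fuel + 1, i =>
    if i < lines.length then
      if pvIsDiv (lines.getD i "") then
        match pvFindClose lines (lines.length - (i + 1)) (i + 1) with
        | some j =>
            (true, PySem.List.slice lines (some (i : Int)) (some ((j : Int) + 1)))
              :: pvSplitChunks lines fuel (j + 1)
        | none => (false, [lines.getD i ""]) :: pvSplitChunks lines fuel (i + 1)
      else
        (false, (pvCollect lines (lines.length - (i + 1)) (i + 1) [lines.getD i ""]).1)
          :: pvSplitChunks lines fuel (pvCollect lines (lines.length - (i + 1)) (i + 1) [lines.getD i ""]).2
    else []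

-- step 2: the rendering for-loop over chunks, with `result` as accumulator
def pvProcess (chunks : List (Bool × List String)) (result : List String) : List String :=
  match chunks with
  | [] => result
  | (isDiv, chunk) :: rest =>
      if isDiv then
        pvProcess rest
          (result ++ [""] ++ ["<!-- prettier-ignore-start -->"] ++ chunk
            ++ ["<!-- prettier-ignore-end -->"] ++ [""])
      else pvProcess rest (result ++ chunk)

def add_prettier_ignore_to_div_blocks (lines : List String) : List String :=
  pvProcess (pvSplitChunks lines lines.length 0) []

-- ===== PORT B =====
-- marks = [i for i, line in enumerate(lines) if line.strip().startswith(":::")]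
def pvMarks (lines : List String) : List Nat :=
  (List.range lines.length).filter (fun i => pvIsDiv (lines.getD i ""))

-- B's `while len(marks) >= 2` loop consuming two markers per step
def pvAltLoop (lines : List String) : List Nat → Nat → List String → List String
  | a :: b :: rest, prev, result =>
      pvAltLoop lines rest (b + 1)
        (result ++ PySem.List.slice lines (some (prev : Int)) (some (a : Int))
          ++ ["", "<!-- prettier-ignore-start -->"]
          ++ PySem.List.slice lines (some (a : Int)) (some ((b : Int) + 1))
          ++ ["<!-- prettier-ignore-end -->", ""])
  -- fewer than two markers left: the while-loop exits, trailing lines are copied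
  | [_], prev, result => result ++ PySem.List.slice lines (some (prev : Int)) none
  | [], prev, result => result ++ PySem.List.slice lines (some (prev : Int)) none

def add_prettier_ignore_to_div_blocks_alt (lines : List String) : List String :=
  pvAltLoop lines (pvMarks lines) 0 []

-- ===== PRECONDITION & SPEC =====
def Spec_add_prettier_ignore_to_div_blocks (lines : List String) (out : List String) : Prop := out = add_prettier_ignore_to_div_blocks_alt lines
instance (lines : List String) (out : List String) : Decidable (Spec_add_prettier_ignore_to_div_blocks lines out) := by unfold Spec_add_prettier_ignore_to_div_blocks; infer_instance

-- ===== CLAIM (what is proved, stated in full; the proofs are below) =====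
def Claim_equal_add_prettier_ignore_to_div_blocks : Prop := ∀ (lines : List String), Dom_add_prettier_ignore_to_div_blocks lines → Spec_add_prettier_ignore_to_div_blocks lines (add_prettier_ignore_to_div_blocks lines)

-- ===== LEMMAS AND PROOFS =====

-- Proof-side bridge: A's two-phase pipeline equals a fused index scan (pvFused),
-- and the fused scan equals B's marker-pairing loop. pvFused/pvScan are proof
-- helpers only, used by the lemmas below; neither port refers to them.

def pvScan (lines : List String) : Nat → Nat → Nat
  | 0, j => j
  | fuel + 1, j =>
    if j < lines.length then
      if pvIsDiv (lines.getD j "") then j else pvScan lines fuel (j + 1)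
    else j

def pvFused (lines : List String) : Nat → Nat → List String → List String
  | 0, _, result => result
  | fuel + 1, i, result =>
    if i < lines.length then
      if pvIsDiv (lines.getD i "") then
        if pvScan lines (lines.length - (i + 1)) (i + 1) < lines.length then
          pvFused lines fuel (pvScan lines (lines.length - (i + 1)) (i + 1) + 1)
            (result ++ [""] ++ ["<!-- prettier-ignore-start -->"]
              ++ PySem.List.slice lines (some (i : Int))
                   (some ((pvScan lines (lines.length - (i + 1)) (i + 1) : Int) + 1))
              ++ ["<!-- prettier-ignore-end -->"] ++ [""])
        else pvFused lines fuel (i + 1) (result ++ [lines.getD i ""])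
      else pvFused lines fuel (i + 1) (result ++ [lines.getD i ""])
    else result

-- the markers of lines at indices ≥ i
def pvMarksFrom (lines : List String) (i : Nat) : List Nat :=
  (List.range' i (lines.length - i)).filter (fun k => pvIsDiv (lines.getD k ""))

theorem pvScan_ge (lines : List String) (fuel j : Nat) : j ≤ pvScan lines fuel j := by
  induction fuel generalizing j with
  | zero => simp [pvScan]
  | succ fuel ih =>
    rw [pvScan]
    split_ifs
    · omega
    · exact le_trans (by omega) (ih (j + 1))
    · omega

theorem pvCollect_ge (lines : List String) (fuel i : Nat) (acc : List String) :
    i ≤ (pvCollect lines fuel i acc).2 := by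
  induction fuel generalizing i acc with
  | zero => simp [pvCollect]
  | succ fuel ih =>
    rw [pvCollect]
    split_ifs
    · omega
    · exact le_trans (by omega) (ih (i + 1) _)
    · omega

theorem pvFindClose_ge (lines : List String) (fuel j k : Nat)
    (h : pvFindClose lines fuel j = some k) : j ≤ k ∧ k < lines.length := by
  induction fuel generalizing j with
  | zero => simp [pvFindClose] at h
  | succ fuel ih =>
    rw [pvFindClose] at h
    split_ifs at h
    · cases h; omega
    · have := ih (j + 1) h; omega

theorem pvProcess_acc (chunks : List (Bool × List String)) (res : List String) :
    pvProcess chunks res = res ++ pvProcess chunks [] := by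
  induction chunks generalizing res with
  | nil => simp [pvProcess]
  | cons c rest ih =>
    obtain ⟨b, chunk⟩ := c
    cases b
    · simp only [pvProcess, Bool.false_eq_true, if_false]
      rw [ih]
      conv_rhs => rw [ih]
      simp
    · simp only [pvProcess, if_true]
      rw [ih]
      conv_rhs => rw [ih]
      simp

theorem pvFused_acc (lines : List String) (fuel i : Nat) (res : List String) :
    pvFused lines fuel i res = res ++ pvFused lines fuel i [] := by
  induction fuel generalizing i res with
  | zero => simp [pvFused]
  | succ fuel ih =>
    rw [pvFused]
    conv_rhs => rw [pvFused]
    split_ifs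
    · rw [ih]
      conv_rhs => rw [ih]
      simp
    · rw [ih]
      conv_rhs => rw [ih]
      simp
    · rw [ih]
      conv_rhs => rw [ih]
      simp
    · simp

theorem pvCollect_acc (lines : List String) (fuel i : Nat) (acc : List String) :
    pvCollect lines fuel i acc
      = (acc ++ (pvCollect lines fuel i []).1, (pvCollect lines fuel i []).2) := by
  induction fuel generalizing i acc with
  | zero => simp [pvCollect]
  | succ fuel ih =>
    rw [pvCollect]
    conv_rhs => rw [pvCollect]
    split_ifs
    · simp
    · rw [ih (i + 1) _]
      conv_rhs => rw [ih (i + 1) _]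
      simp
    · simp

-- with sufficient fuel, A's look-ahead finds exactly the fused scan's stopping index (when in range)
theorem pvFindClose_eq_scan (lines : List String) (fuel j : Nat)
    (hf : lines.length - j ≤ fuel) :
    pvFindClose lines fuel j =
      if pvScan lines fuel j < lines.length then some (pvScan lines fuel j) else none := by
  induction fuel generalizing j with
  | zero =>
    have : ¬ j < lines.length := by omega
    simp [pvFindClose, pvScan, this]
  | succ fuel ih =>
    rw [pvFindClose]
    conv_rhs => rw [pvScan]
    by_cases h : j < lines.length
    · by_cases hd : pvIsDiv (lines.getD j "") = true
      · simp only [if_pos hd, if_pos h]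
      · simp only [if_pos h, if_neg hd]
        exact ih (j + 1) (by omega)
    · simp [h]

-- the chunk list does not depend on the fuel, given enough of it
theorem pvSplit_congr (lines : List String) : ∀ (n fuel fuel' i : Nat),
    lines.length - i ≤ fuel → lines.length - i ≤ fuel' → lines.length - i = n →
    pvSplitChunks lines fuel i = pvSplitChunks lines fuel' i := by
  intro n
  induction n using Nat.strong_induction_on with
  | _ n ih =>
    intro fuel fuel' i hf hf' hn
    match fuel, fuel' with
    | 0, 0 => rfl
    | 0, g + 1 =>
      have : ¬ i < lines.length := by omega
      simp [pvSplitChunks, this]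
    | g + 1, 0 =>
      have : ¬ i < lines.length := by omega
      simp [pvSplitChunks, this]
    | g + 1, g' + 1 =>
      rw [pvSplitChunks]
      conv_rhs => rw [pvSplitChunks]
      split_ifs with h hd
      · cases heq : pvFindClose lines (lines.length - (i + 1)) (i + 1) with
        | some j =>
          have hj := pvFindClose_ge lines _ _ _ heq
          dsimp only
          rw [ih (lines.length - (j + 1)) (by omega) g g' (j + 1) (by omega) (by omega) rfl]
        | none =>
          dsimp only
          rw [ih (lines.length - (i + 1)) (by omega) g g' (i + 1) (by omega) (by omega) rfl]
      · have hc := pvCollect_ge lines (lines.length - (i + 1)) (i + 1) [lines.getD i ""]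
        rw [ih (lines.length - (pvCollect lines (lines.length - (i + 1)) (i + 1) [lines.getD i ""]).2)
              (by omega) g g' _ (by omega) (by omega) rfl]
      · rfl

-- on a non-div head, A's chunking just pushes the head line into the pending output
theorem pvSplit_nondiv (lines : List String) (fuel i : Nat) (res : List String)
    (hf : lines.length - i ≤ fuel + 1)
    (h : i < lines.length) (hd : ¬ pvIsDiv (lines.getD i "") = true) :
    pvProcess (pvSplitChunks lines (fuel + 1) i) res
      = pvProcess (pvSplitChunks lines fuel (i + 1)) (res ++ [lines.getD i ""]) := by
  rw [pvSplitChunks]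
  simp only [if_pos h, hd]
  by_cases h1 : i + 1 < lines.length
  · obtain ⟨g, hg⟩ : ∃ g, lines.length - (i + 1) = g + 1 := ⟨lines.length - (i + 2), by omega⟩
    obtain ⟨f, hfe⟩ : ∃ f, fuel = f + 1 := ⟨fuel - 1, by omega⟩
    by_cases hd1 : pvIsDiv (lines.getD (i + 1) "") = true
    · have e1 : pvCollect lines (lines.length - (i + 1)) (i + 1) [lines.getD i ""]
          = ([lines.getD i ""], i + 1) := by
        rw [hg, pvCollect, if_pos h1, if_pos hd1]
      rw [e1]
      simp only [pvProcess, Bool.false_eq_true, if_false]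
    · obtain ⟨u, v, hp⟩ : ∃ u v, pvCollect lines g (i + 1 + 1) [] = (u, v) := ⟨_, _, rfl⟩
      have e1 : pvCollect lines (lines.length - (i + 1)) (i + 1) [lines.getD i ""]
          = ([lines.getD i ""] ++ [lines.getD (i + 1) ""] ++ u, v) := by
        rw [hg, pvCollect, if_pos h1, if_neg hd1,
            pvCollect_acc lines g (i + 1 + 1) ([lines.getD i ""] ++ [lines.getD (i + 1) ""]), hp]
      have e2 : pvCollect lines (lines.length - (i + 1 + 1)) (i + 1 + 1) [lines.getD (i + 1) ""]
          = ([lines.getD (i + 1) ""] ++ u, v) := by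
        have hg2 : lines.length - (i + 1 + 1) = g := by omega
        rw [hg2, pvCollect_acc lines g (i + 1 + 1) [lines.getD (i + 1) ""], hp]
      conv_rhs => rw [hfe, pvSplitChunks]
      simp only [if_pos h1, hd1]
      rw [e1, e2]
      simp only [pvProcess, Bool.false_eq_true, if_false]
      have hv : i + 1 + 1 ≤ v := le_trans (le_refl _) (by
        have := pvCollect_ge lines g (i + 1 + 1) ([] : List String)
        rw [hp] at this; exact this)
      rw [pvSplit_congr lines (lines.length - v) fuel f v (by omega) (by omega) rfl]
      congr 1
      simp
  · have e1 : pvCollect lines (lines.length - (i + 1)) (i + 1) [lines.getD i ""]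
        = ([lines.getD i ""], i + 1) := by
      have : lines.length - (i + 1) = 0 := by omega
      rw [this, pvCollect]
    rw [e1]
    simp only [pvProcess, Bool.false_eq_true, if_false]

theorem pvKey (lines : List String) (fuel : Nat) : ∀ i : Nat, lines.length - i ≤ fuel →
    pvProcess (pvSplitChunks lines fuel i) [] = pvFused lines fuel i [] := by
  induction fuel with
  | zero => intro i _; simp [pvSplitChunks, pvFused, pvProcess]
  | succ fuel ih =>
    intro i hf
    by_cases h : i < lines.length
    · by_cases hd : pvIsDiv (lines.getD i "") = true
      · rw [pvSplitChunks, pvFused]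
        simp only [if_pos h, hd, if_true]
        by_cases hj : pvScan lines (lines.length - (i + 1)) (i + 1) < lines.length
        · have hge := pvScan_ge lines (lines.length - (i + 1)) (i + 1)
          have hfc : pvFindClose lines (lines.length - (i + 1)) (i + 1)
              = some (pvScan lines (lines.length - (i + 1)) (i + 1)) := by
            rw [pvFindClose_eq_scan lines _ _ (by omega), if_pos hj]
          rw [hfc, if_pos hj]
          simp only [pvProcess, if_true]
          conv_rhs => rw [pvFused_acc]
          rw [pvProcess_acc, ih _ (by omega)]
        · have hfc : pvFindClose lines (lines.length - (i + 1)) (i + 1) = none := by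
            rw [pvFindClose_eq_scan lines _ _ (by omega), if_neg hj]
          rw [hfc, if_neg hj]
          simp only [pvProcess, Bool.false_eq_true, if_false]
          conv_rhs => rw [pvFused_acc]
          rw [pvProcess_acc, ih (i + 1) (by omega)]
      · rw [pvSplit_nondiv lines fuel i [] hf h hd, pvFused]
        simp only [if_pos h, hd]
        rw [pvProcess_acc, ih (i + 1) (by omega)]
        simp only [List.nil_append]
        rw [pvFused_acc lines fuel (i + 1) [lines.getD i ""]]
        simp only [Bool.false_eq_true, if_false]
    · rw [pvSplitChunks, pvFused]
      simp [h, pvProcess]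

-- ===== the second bridge: pvFused = pvAltLoop over pvMarksFrom =====

theorem pvMarksFrom_stop (lines : List String) (i : Nat) (h : lines.length ≤ i) :
    pvMarksFrom lines i = [] := by
  unfold pvMarksFrom
  have : lines.length - i = 0 := by omega
  simp [this]

theorem pvMarksFrom_cons (lines : List String) (i : Nat) (h : i < lines.length) :
    pvMarksFrom lines i =
      if pvIsDiv (lines.getD i "") then i :: pvMarksFrom lines (i + 1)
      else pvMarksFrom lines (i + 1) := by
  unfold pvMarksFrom
  have h1 : lines.length - i = (lines.length - (i + 1)) + 1 := by omega
  rw [h1, List.range'_succ, List.filter_cons]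

theorem pvMarksFrom_mem (lines : List String) (i m : Nat)
    (h : m ∈ pvMarksFrom lines i) : i ≤ m := by
  unfold pvMarksFrom at h
  have := List.mem_filter.mp h
  have := List.mem_range'.mp this.1
  omega

theorem pvSlice_empty (lines : List String) (i a : Nat) (h : a ≤ i) :
    PySem.List.slice lines (some (i : Int)) (some (a : Int)) = [] := by
  rw [PySem.List.slice_natCast]
  have : a - i = 0 := by omega
  simp [this]

theorem pvSlice_cons (lines : List String) (i a : Nat) (hi : i < lines.length) (ha : i < a) :
    PySem.List.slice lines (some (i : Int)) (some (a : Int))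
      = lines.getD i "" :: PySem.List.slice lines (some ((i + 1 : Nat) : Int)) (some (a : Int)) := by
  rw [PySem.List.slice_natCast, PySem.List.slice_natCast]
  rw [List.drop_eq_getElem_cons hi]
  have h1 : a - i = (a - (i + 1)) + 1 := by omega
  rw [h1, List.take_succ_cons, List.getD_eq_getElem lines "" hi]

theorem pvSliceFrom_cons (lines : List String) (i : Nat) (hi : i < lines.length) :
    PySem.List.slice lines (some (i : Int)) none
      = lines.getD i "" :: PySem.List.slice lines (some ((i + 1 : Nat) : Int)) none := by
  rw [PySem.List.slice_from_natCast, PySem.List.slice_from_natCast]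
  rw [List.drop_eq_getElem_cons hi, List.getD_eq_getElem lines "" hi]

theorem pvSliceFrom_empty (lines : List String) (i : Nat) (h : lines.length ≤ i) :
    PySem.List.slice lines (some (i : Int)) none = [] := by
  rw [PySem.List.slice_from_natCast]
  exact List.drop_eq_nil_of_le h

-- advancing prev over a line below every remaining marker just copies that line
theorem pvAltLoop_shift (lines : List String) (ms : List Nat) (prev : Nat) (res : List String)
    (hp : prev < lines.length) (hm : ∀ m ∈ ms, prev < m) :
    pvAltLoop lines ms prev res
      = pvAltLoop lines ms (prev + 1) (res ++ [lines.getD prev ""]) := by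
  match ms with
  | a :: b :: rest =>
    have ha : prev < a := hm a (by simp)
    rw [pvAltLoop, pvAltLoop, pvSlice_cons lines prev a hp ha]
    simp
  | [] =>
    rw [pvAltLoop, pvAltLoop, pvSliceFrom_cons lines prev hp]
    simp
  | [a] =>
    rw [pvAltLoop, pvAltLoop, pvSliceFrom_cons lines prev hp]
    simp

-- the fused scan's look-ahead vs the marker list
theorem pvScan_marks (lines : List String) (fuel : Nat) : ∀ j : Nat, j ≤ lines.length →
    lines.length - j ≤ fuel →
    (pvScan lines fuel j < lines.length →
       pvMarksFrom lines j = pvScan lines fuel j :: pvMarksFrom lines (pvScan lines fuel j + 1)) ∧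
    (¬ pvScan lines fuel j < lines.length → pvMarksFrom lines j = []) := by
  induction fuel with
  | zero =>
    intro j hj hf
    have : j = lines.length := by omega
    subst this
    simp [pvScan, pvMarksFrom_stop]
  | succ fuel ih =>
    intro j hj hf
    by_cases h : j < lines.length
    · by_cases hd : pvIsDiv (lines.getD j "") = true
      · rw [pvScan]
        simp only [if_pos h, if_pos hd]
        constructor
        · intro _
          rw [pvMarksFrom_cons lines j h, if_pos hd]
        · intro hc; omega
      · rw [pvScan]
        simp only [if_pos h, if_neg hd]
        rw [pvMarksFrom_cons lines j h, if_neg hd]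
        exact ih (j + 1) (by omega) (by omega)
    · rw [pvScan]
      simp only [if_neg h]
      exact ⟨fun hc => absurd hc h, fun _ => pvMarksFrom_stop lines j (by omega)⟩

-- when no markers remain, the fused scan copies the tail through
theorem pvFused_copy (lines : List String) (fuel : Nat) : ∀ i : Nat, lines.length - i ≤ fuel →
    pvMarksFrom lines i = [] →
    pvFused lines fuel i [] = lines.drop i := by
  induction fuel with
  | zero =>
    intro i hf _
    have : ¬ i < lines.length := by omega
    rw [pvFused, List.drop_eq_nil_of_le (by omega)]
  | succ fuel ih =>
    intro i hf hm
    by_cases h : i < lines.length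
    · have hd : ¬ pvIsDiv (lines.getD i "") = true := by
        intro hd
        rw [pvMarksFrom_cons lines i h, if_pos hd] at hm
        exact List.cons_ne_nil _ _ hm
      have hm1 : pvMarksFrom lines (i + 1) = [] := by
        rw [pvMarksFrom_cons lines i h, if_neg hd] at hm
        exact hm
      rw [pvFused]
      simp only [if_pos h, if_neg hd]
      rw [pvFused_acc, ih (i + 1) (by omega) hm1, List.drop_eq_getElem_cons h,
          List.getD_eq_getElem lines "" h]
      simp
    · rw [pvFused, List.drop_eq_nil_of_le (by omega)]
      simp [h]

set_option maxHeartbeats 1000000 in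
theorem pvKey2 (lines : List String) (fuel : Nat) : ∀ (i : Nat) (res : List String),
    lines.length - i ≤ fuel →
    pvFused lines fuel i res = pvAltLoop lines (pvMarksFrom lines i) i res := by
  induction fuel with
  | zero =>
    intro i res hf
    have h : ¬ i < lines.length := by omega
    rw [pvFused, pvMarksFrom_stop lines i (by omega), pvAltLoop,
        pvSliceFrom_empty lines i (by omega)]
    simp
  | succ fuel ih =>
    intro i res hf
    by_cases h : i < lines.length
    · by_cases hd : pvIsDiv (lines.getD i "") = true
      · rw [pvFused]
        simp only [if_pos h, if_pos hd]
        have hs := pvScan_marks lines (lines.length - (i + 1)) (i + 1) (by omega) (le_refl _)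
        set j := pvScan lines (lines.length - (i + 1)) (i + 1) with hjdef
        have hge : i + 1 ≤ j := pvScan_ge lines _ _
        by_cases hj : j < lines.length
        · rw [if_pos hj]
          have hm1 : pvMarksFrom lines (i + 1) = j :: pvMarksFrom lines (j + 1) := hs.1 hj
          rw [pvMarksFrom_cons lines i h, if_pos hd, hm1, pvAltLoop,
              pvSlice_empty lines i i (le_refl i)]
          rw [ih (j + 1) _ (by omega)]
          congr 1
          simp
        · rw [if_neg hj]
          have hm1 : pvMarksFrom lines (i + 1) = [] := hs.2 hj
          rw [pvMarksFrom_cons lines i h, if_pos hd, hm1, pvAltLoop,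
              pvSliceFrom_cons lines i h]
          rw [pvFused_acc, pvFused_copy lines fuel (i + 1) (by omega) hm1]
          rw [← PySem.List.slice_from_natCast]
          simp
      · rw [pvFused]
        simp only [if_pos h, if_neg hd]
        have hm : pvMarksFrom lines i = pvMarksFrom lines (i + 1) := by
          rw [pvMarksFrom_cons lines i h, if_neg hd]
        rw [hm, ih (i + 1) _ (by omega),
            ← pvAltLoop_shift lines _ i res h
              (fun m hmm => lt_of_lt_of_le (by omega) (pvMarksFrom_mem lines (i + 1) m hmm))]
    · have hni : lines.length ≤ i := by omega
      rw [pvFused, pvMarksFrom_stop lines i hni, pvAltLoop,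
          pvSliceFrom_empty lines i hni]
      simp [h]

theorem pvMarks_eq (lines : List String) : pvMarks lines = pvMarksFrom lines 0 := by
  unfold pvMarks pvMarksFrom
  rw [List.range_eq_range']
  simp

-- ===== VERDICT (by name: the statement is the Claim_ definition above) =====
theorem add_prettier_ignore_to_div_blocks_spec : Claim_equal_add_prettier_ignore_to_div_blocks := by
  intro lines _
  unfold Spec_add_prettier_ignore_to_div_blocks add_prettier_ignore_to_div_blocks add_prettier_ignore_to_div_blocks_alt
  rw [pvKey lines lines.length 0 (by omega), pvMarks_eq,
      pvKey2 lines lines.length 0 [] (by omega)]
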